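-- pv_equiv track=rewrite | github.com/JohnBetaCode/Repo_Tech_Debt_Tooling | scripts/utils.py | check_required_labels
-- ===== SOURCE A (Python) =====
-- def check_required_labels(item: dict, required_labels: dict, item_type: str) -> dict:
--     """
--     Checks if an item (issue or PR) has at least one label from each required category.
--
--     Args:
--         item (dict): The issue or PR to check
--         required_labels (dict): Dictionary of required label categories and their values
--             Example structure:
--             {
--                 'issues': {
--                     'type': ['feature', 'bug', 'enhancement'],
--                     'priority': ['PRIORITY_LOW', 'PRIORITY_MEDIUM', ...]
--                 },
--                 'prs': {
--                     'priority': ['PRIORITY_LOW', 'PRIORITY_MEDIUM', ...],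
--                     'documentation': ['doc_done', 'doc_no-req'],
--                     'status': ['testing']
--                 }
--             }
--         item_type (str): Either 'issues' or 'prs'
--
--     Returns:
--         dict: Dictionary containing missing label categories
--         Example: {
--             'type': True,  # Has at least one label from this category
--             'priority': False,  # Missing labels from this category
--             'documentation': True
--         }
--     """
--     # Get the set of labels on the item
--     item_labels = {label["name"] for label in item.get("labels", [])}
--
--     # Skip items with the "ignore_labels" label
--     if "ignore_labels" in item_labels:
--         return {}
--
--     results = {}
--
--     # Get the required categories for this item type
--     type_requirements = required_labels.get(item_type, {})
--
--     # Check each required category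
--     for category, allowed_labels in type_requirements.items():
--         # Check if any of the allowed labels for this category are present
--         has_required_label = any(label in item_labels for label in allowed_labels)
--         results[category] = has_required_label
--
--     return results
-- ===== SOURCE B (Python) =====
-- def check_required_labels(item: dict, required_labels: dict, item_type: str) -> dict:
--     # Inverted-index re-implementation: map each allowed label to its categories,
--     # then one pass over the item's labels flips categories to True.
--     item_labels = {label["name"] for label in item.get("labels", [])}
--
--     if "ignore_labels" in item_labels:
--         return {}
--
--     type_requirements = required_labels.get(item_type, {})
--
--     results = {}
--     index = {}
--     for category, allowed_labels in type_requirements.items():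
--         results[category] = False
--         for label in allowed_labels:
--             index.setdefault(label, []).append(category)
--
--     for label in item_labels:
--         for category in index.get(label, []):
--             results[category] = True
--
--     return results
-- ===== Notes on version B (the rewrite author's own statement) =====
-- stated objective: alternative
-- what changed: Replaces the per-category rescan of the label set by an inverted index from label name to categories: results start all-False and one pass over the item's labels flips the categories that label satisfies.
import Mathlib
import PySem

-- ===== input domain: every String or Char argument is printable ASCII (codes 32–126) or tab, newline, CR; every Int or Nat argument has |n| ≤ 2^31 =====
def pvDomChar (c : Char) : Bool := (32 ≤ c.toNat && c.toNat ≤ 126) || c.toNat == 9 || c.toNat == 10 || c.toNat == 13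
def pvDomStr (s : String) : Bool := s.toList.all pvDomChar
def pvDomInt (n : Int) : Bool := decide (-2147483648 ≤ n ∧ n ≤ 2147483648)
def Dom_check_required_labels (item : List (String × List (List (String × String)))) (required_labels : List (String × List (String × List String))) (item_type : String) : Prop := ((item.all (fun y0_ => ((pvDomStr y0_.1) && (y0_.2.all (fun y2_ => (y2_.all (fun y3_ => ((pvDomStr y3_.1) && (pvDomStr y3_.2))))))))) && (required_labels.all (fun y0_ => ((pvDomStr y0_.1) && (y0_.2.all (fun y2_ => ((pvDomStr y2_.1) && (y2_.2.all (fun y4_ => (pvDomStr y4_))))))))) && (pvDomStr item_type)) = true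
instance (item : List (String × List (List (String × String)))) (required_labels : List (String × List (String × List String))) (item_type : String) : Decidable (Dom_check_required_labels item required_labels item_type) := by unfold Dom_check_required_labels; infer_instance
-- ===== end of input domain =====

-- B replaces A's per-category scan over the label set by an inverted index
-- (label name → categories) consulted once per item label (objective: alternative).

-- ===== PORT A =====
-- shared with B (identical Python line in both): item_labels = {label["name"] for label in item.get("labels", [])}
-- label["name"] is a raising lookup; Pre_ requires every label dict to contain "name", so filterMap = map there.
def pvLabelSet (item : List (String × List (List (String × String)))) : PySem.Set String :=
  PySem.Set.ofList (((PySem.Dict.mk item).getD "labels" []).filterMap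
    (fun l => (PySem.Dict.mk l).get? "name"))

def check_required_labels (item : List (String × List (List (String × String)))) (required_labels : List (String × List (String × List String))) (item_type : String) : List (String × Bool) :=
  let item_labels := pvLabelSet item
  if PySem.Set.contains item_labels "ignore_labels" then []
  else
    let type_requirements := (PySem.Dict.mk required_labels).getD item_type []
    (type_requirements.foldl
      (fun (results : PySem.Dict String Bool) p =>
        results.insert p.1 (p.2.any (fun lab => PySem.Set.contains item_labels lab)))
      PySem.Dict.empty).items

-- ===== PORT B =====
def check_required_labels_alt (item : List (String × List (List (String × String)))) (required_labels : List (String × List (String × List String))) (item_type : String) : List (String × Bool) :=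
  let item_labels := pvLabelSet item
  if PySem.Set.contains item_labels "ignore_labels" then []
  else
    let type_requirements := (PySem.Dict.mk required_labels).getD item_type []
    -- one loop, two accumulators: results[category] = False; index.setdefault(label, []).append(category)
    let st := type_requirements.foldl
      (fun (st : PySem.Dict String Bool × PySem.Dict String (List String)) p =>
        (st.1.insert p.1 false,
         p.2.foldl (fun idx lab => idx.modify lab [] (· ++ [p.1])) st.2))
      (PySem.Dict.empty, PySem.Dict.empty)
    -- for label in item_labels: for category in index.get(label, []): results[category] = True
    (item_labels.foldl
      (fun (res : PySem.Dict String Bool) lab =>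
        ((st.2).getD lab []).foldl (fun r c => r.insert c true) res)
      st.1).items

-- ===== PRECONDITION & SPEC =====
-- Pre_ excludes (a) items with a label dict lacking the "name" key, where A raises KeyError, and
-- (b) association lists whose category dict for this item type repeats a key — duplicate keys do not
-- represent a Python dict (a real dict collapses them), and the two traversals read different occurrences there.
def Pre_check_required_labels (item : List (String × List (List (String × String)))) (required_labels : List (String × List (String × List String))) (item_type : String) : Prop :=
  (((PySem.Dict.mk item).getD "labels" []).all (fun l => (PySem.Dict.mk l).contains "name")) = true ∧
  (((PySem.Dict.mk required_labels).getD item_type []).map (·.1)).Nodup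
instance (item : List (String × List (List (String × String)))) (required_labels : List (String × List (String × List String))) (item_type : String) : Decidable (Pre_check_required_labels item required_labels item_type) := by unfold Pre_check_required_labels; infer_instance

def pvWitness_check_required_labels : (List (String × List (List (String × String)))) × (List (String × List (String × List String))) × String :=
  ([("labels", [[("name", "x")]])], [("t", [("c", ["x", "y"]), ("d", ["z"])])], "t")

def Spec_check_required_labels (item : List (String × List (List (String × String)))) (required_labels : List (String × List (String × List String))) (item_type : String) (out : List (String × Bool)) : Prop := out = check_required_labels_alt item required_labels item_type
instance (item : List (String × List (List (String × String)))) (required_labels : List (String × List (String × List String))) (item_type : String) (out : List (String × Bool)) : Decidable (Spec_check_required_labels item required_labels item_type out) := by unfold Spec_check_required_labels; infer_instance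

-- ===== CLAIM (what is proved, stated in full; the proofs are below) =====
def Claim_equal_check_required_labels : Prop := ∀ (item : List (String × List (List (String × String)))) (required_labels : List (String × List (String × List String))) (item_type : String), Dom_check_required_labels item required_labels item_type → Pre_check_required_labels item required_labels item_type → Spec_check_required_labels item required_labels item_type (check_required_labels item required_labels item_type)

-- ===== LEMMAS AND PROOFS =====

-- phase-2 inner loop: getD after inserting `true` at every key of ks
theorem pv_getD_insert_true (ks : List String) (d : PySem.Dict String Bool) (k : String) :
    (ks.foldl (fun r c => r.insert c true) d).getD k false
      = if k ∈ ks then true else d.getD k false := by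
  induction ks generalizing d with
  | nil => simp
  | cons a t ih =>
      simp only [List.foldl_cons, ih, PySem.Dict.getD_insert, List.mem_cons]
      by_cases h1 : k ∈ t <;> by_cases h2 : k = a <;> simp [h1, h2]

theorem pv_keys_insert_true (ks : List String) (d : PySem.Dict String Bool)
    (h : ∀ c ∈ ks, d.contains c = true) :
    (ks.foldl (fun r c => r.insert c true) d).keys = d.keys := by
  induction ks generalizing d with
  | nil => rfl
  | cons a t ih =>
      simp only [List.foldl_cons]
      rw [ih]
      · exact PySem.Dict.keys_insert_of_contains d true (h a (by simp))
      · intro c hc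
        rw [PySem.Dict.contains_insert]
        simp [h c (List.mem_cons_of_mem _ hc)]

-- phase 2 (nested over the label set): getD characterisation
theorem pv_getD_phase2 (S : List String) (g : String → List String)
    (d : PySem.Dict String Bool) (k : String) :
    (S.foldl (fun res lab => (g lab).foldl (fun r c => r.insert c true) res) d).getD k false
      = if ∃ lab ∈ S, k ∈ g lab then true else d.getD k false := by
  induction S generalizing d with
  | nil => simp
  | cons a t ih =>
      simp only [List.foldl_cons, ih, pv_getD_insert_true]
      by_cases h1 : ∃ lab ∈ t, k ∈ g lab
      · obtain ⟨l, hl, hk⟩ := h1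
        rw [if_pos ⟨l, hl, hk⟩, if_pos ⟨l, List.mem_cons_of_mem _ hl, hk⟩]
      · by_cases h2 : k ∈ g a
        · rw [if_neg h1, if_pos h2, if_pos ⟨a, List.mem_cons_self, h2⟩]
        · have hno : ¬ ∃ lab ∈ a :: t, k ∈ g lab := by
            rintro ⟨l, hl, hk⟩
            rcases List.mem_cons.mp hl with rfl | hl
            · exact h2 hk
            · exact h1 ⟨l, hl, hk⟩
          rw [if_neg h1, if_neg h2, if_neg hno]

theorem pv_contains_insert_true (ks : List String) (d : PySem.Dict String Bool) (c : String)
    (h : d.contains c = true) :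
    (ks.foldl (fun r c => r.insert c true) d).contains c = true := by
  induction ks generalizing d with
  | nil => exact h
  | cons a t ih =>
      simp only [List.foldl_cons]
      exact ih _ (by rw [PySem.Dict.contains_insert]; simp [h])

theorem pv_keys_phase2 (S : List String) (g : String → List String)
    (d : PySem.Dict String Bool)
    (h : ∀ lab, ∀ c ∈ g lab, d.contains c = true) :
    (S.foldl (fun res lab => (g lab).foldl (fun r c => r.insert c true) res) d).keys = d.keys := by
  induction S generalizing d with
  | nil => rfl
  | cons a t ih =>
      simp only [List.foldl_cons]
      rw [ih, pv_keys_insert_true _ _ (h a)]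
      intro lab c hc
      exact pv_contains_insert_true _ _ _ (h lab c hc)

-- index inner loop: membership of getD after modify-append over one allowed list
theorem pv_mem_inner (l : List String) (c : String) (d : PySem.Dict String (List String))
    (lab k : String) :
    k ∈ (l.foldl (fun d x => d.modify x [] (· ++ [c])) d).getD lab []
      ↔ k ∈ d.getD lab [] ∨ (k = c ∧ lab ∈ l) := by
  induction l generalizing d with
  | nil => simp
  | cons x t ih =>
      simp only [List.foldl_cons, ih, PySem.Dict.getD_modify, List.mem_cons]
      by_cases h : lab = x
      · simp [h]; tauto
      · simp [h]

-- index characterisation over the whole category list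
theorem pv_mem_index (tr : List (String × List String)) (d : PySem.Dict String (List String))
    (lab k : String) :
    k ∈ (tr.foldl (fun idx p => p.2.foldl (fun idx x => idx.modify x [] (· ++ [p.1])) idx) d).getD lab []
      ↔ k ∈ d.getD lab [] ∨ ∃ p ∈ tr, p.1 = k ∧ lab ∈ p.2 := by
  induction tr generalizing d with
  | nil => simp
  | cons q t ih =>
      simp only [List.foldl_cons, ih, pv_mem_inner]
      constructor
      · rintro (⟨h | ⟨hk, hl⟩⟩ | ⟨p, hp, h1, h2⟩)
        · exact Or.inl h
        · exact Or.inr ⟨q, List.mem_cons_self, hk.symm, hl⟩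
        · exact Or.inr ⟨p, List.mem_cons_of_mem _ hp, h1, h2⟩
      · rintro (h | ⟨p, hp, h1, h2⟩)
        · exact Or.inl (Or.inl h)
        · rcases List.mem_cons.mp hp with rfl | hp
          · exact Or.inl (Or.inr ⟨h1.symm, h2⟩)
          · exact Or.inr ⟨p, hp, h1, h2⟩

-- main equivalence of the two dict-building strategies, for any label set S and Nodup category list
theorem pv_main (S : PySem.Set String) (tr : List (String × List String))
    (hnd : (tr.map (fun x => x.1)).Nodup) :
    (tr.foldl (fun (d : PySem.Dict String Bool) p =>
        d.insert p.1 (p.2.any (fun lab => PySem.Set.contains S lab))) PySem.Dict.empty).items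
    = (S.foldl (fun res lab =>
          (((tr.foldl (fun idx p => p.2.foldl (fun idx x => idx.modify x [] (· ++ [p.1])) idx)
              PySem.Dict.empty).getD lab []).foldl (fun r c => r.insert c true) res))
        (tr.foldl (fun (d : PySem.Dict String Bool) p => d.insert p.1 false) PySem.Dict.empty)).items := by
  set vA : String × List String → Bool := fun p => p.2.any (fun lab => PySem.Set.contains S lab) with hvA
  set idx := tr.foldl (fun idx p => p.2.foldl (fun idx x => idx.modify x [] (· ++ [p.1])) idx) PySem.Dict.empty with hidx
  set d0 := tr.foldl (fun (d : PySem.Dict String Bool) p => d.insert p.1 false) PySem.Dict.empty with hd0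
  set dA := tr.foldl (fun (d : PySem.Dict String Bool) p => d.insert p.1 (vA p)) PySem.Dict.empty with hdA
  set final := S.foldl (fun res lab => ((idx.getD lab []).foldl (fun r c => r.insert c true) res)) d0 with hfinal
  have hItemsA : dA.items = tr.map (fun p => (p.1, vA p)) := by
    rw [hdA, PySem.Dict.items_foldl_insert_fresh tr (fun x => x.1) vA PySem.Dict.empty
      (fun a _ => PySem.Dict.contains_empty _) hnd]
    rfl
  have hItems0 : d0.items = tr.map (fun p => (p.1, false)) := by
    rw [hd0, PySem.Dict.items_foldl_insert_fresh tr (fun x => x.1) (fun _ => false) PySem.Dict.empty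
      (fun a _ => PySem.Dict.contains_empty _) hnd]
    rfl
  have hKeys0 : d0.keys = tr.map (fun x => x.1) := by
    simp only [PySem.Dict.keys, hItems0, List.map_map]
    rfl
  have hNd0 : d0.keys.Nodup := by rw [hKeys0]; exact hnd
  have hmemidx : ∀ lab k, k ∈ idx.getD lab [] ↔ ∃ p ∈ tr, p.1 = k ∧ lab ∈ p.2 := by
    intro lab k
    rw [hidx, pv_mem_index]
    simp
  have hcont : ∀ lab, ∀ c ∈ idx.getD lab [], d0.contains c = true := by
    intro lab c hc
    obtain ⟨p, hp, h1, -⟩ := (hmemidx lab c).mp hc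
    rw [PySem.Dict.contains_iff_mem_keys, hKeys0]
    exact h1 ▸ List.mem_map_of_mem hp
  have hKeysF : final.keys = d0.keys := pv_keys_phase2 S _ d0 hcont
  have hNdF : final.keys.Nodup := hKeysF ▸ hNd0
  have hgetD0 : ∀ p ∈ tr, d0.getD p.1 false = false := by
    intro p hp
    exact PySem.Dict.getD_of_mem_items d0 (hItems0 ▸ List.mem_map_of_mem hp) hNd0 false
  have hval : ∀ p ∈ tr, final.getD p.1 false = vA p := by
    intro p hp
    rw [hfinal, pv_getD_phase2, hgetD0 p hp]
    by_cases hc : ∃ lab ∈ S, p.1 ∈ idx.getD lab []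
    · rw [if_pos hc]
      obtain ⟨lab, hlab, hkin⟩ := hc
      obtain ⟨q, hq, h1, h2⟩ := (hmemidx lab p.1).mp hkin
      have hq_eq : q = p := List.inj_on_of_nodup_map hnd hq hp h1
      symm
      rw [hvA]
      simp only [List.any_eq_true]
      exact ⟨lab, hq_eq ▸ h2, by simp [PySem.Set.contains, hlab]⟩
    · rw [if_neg hc]
      symm
      rw [hvA]
      simp only [List.any_eq_false]
      intro lab hlab hcon
      have hlabS : lab ∈ S := by simpa [PySem.Set.contains, List.contains_iff_mem] using hcon
      exact hc ⟨lab, hlabS, (hmemidx lab p.1).mpr ⟨p, hp, rfl, hlab⟩⟩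
  calc dA.items = tr.map (fun p => (p.1, vA p)) := hItemsA
    _ = tr.map (fun p => (p.1, final.getD p.1 false)) :=
        (List.map_congr_left (fun p hp => by rw [hval p hp])).symm
    _ = (tr.map (fun x => x.1)).map (fun k => (k, final.getD k false)) := by rw [List.map_map]; rfl
    _ = final.keys.map (fun k => (k, final.getD k false)) := by rw [hKeysF, hKeys0]
    _ = final.items := (PySem.Dict.items_eq_map_keys final hNdF false).symm

-- ===== VERDICT (by name: the statement is the Claim_ definition above) =====
theorem check_required_labels_spec : Claim_equal_check_required_labels := by
  intro item required_labels item_type _ hpre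
  obtain ⟨-, hnd⟩ := hpre
  unfold Spec_check_required_labels check_required_labels check_required_labels_alt
  dsimp only
  rw [PySem.List.foldl_prod_mk
    (f := fun (d : PySem.Dict String Bool) (p : String × List String) => d.insert p.1 false)
    (g := fun (idx : PySem.Dict String (List String)) (p : String × List String) =>
      p.2.foldl (fun idx lab => idx.modify lab [] (· ++ [p.1])) idx)]
  by_cases hig : PySem.Set.contains (pvLabelSet item) "ignore_labels" = true
  · rw [if_pos hig, if_pos hig]
  · rw [if_neg hig, if_neg hig]
    exact pv_main (pvLabelSet item) _ hnd
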